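-- pv_equiv track=rewrite | github.com/KinlyDog/tasks-from-stepik | Study/tasks_from_stepik.py | sharp_replacer
-- ===== SOURCE A (Python) =====
-- def sharp_replacer(string: str) -> str:
--     new_string = ''
--
--     for i, char in enumerate(string):
--         if char == '#':
--             new_string += str(i + 1)
--         else:
--             new_string += string[i]
--
--     return new_string
-- ===== SOURCE B (Python) =====
-- import re
--
--
-- def sharp_replacer(string: str) -> str:
--     return re.sub('#', lambda m: str(m.start() + 1), string)
-- ===== Notes on version B (the rewrite author's own statement) =====
-- stated objective: idiomatic
-- what changed: Replaces the explicit enumerate loop with string concatenation by a single regex substitution whose callback returns the 1-based match position.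
import Mathlib
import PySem

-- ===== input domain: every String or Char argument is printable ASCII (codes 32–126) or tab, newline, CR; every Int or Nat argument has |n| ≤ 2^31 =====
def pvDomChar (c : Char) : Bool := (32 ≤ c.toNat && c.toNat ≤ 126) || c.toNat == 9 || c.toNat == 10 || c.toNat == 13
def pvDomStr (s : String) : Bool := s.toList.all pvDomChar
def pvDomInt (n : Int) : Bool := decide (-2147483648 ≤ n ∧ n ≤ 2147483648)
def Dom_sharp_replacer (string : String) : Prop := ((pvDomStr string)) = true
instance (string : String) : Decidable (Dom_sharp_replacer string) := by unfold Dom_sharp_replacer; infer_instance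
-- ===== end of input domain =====

-- B replaces A's explicit enumerate loop by a single regex substitution (re.sub with a
-- position callback); same return value, ported as a scan that jumps from '#' to '#'.

-- ===== PORT A =====
-- A: accumulate char by char over enumerate(string); on '#' append str(i+1), else string[i].
def sharp_replacer (string : String) : String :=
  String.mk ((PySem.List.enumerate string.toList 0).foldl
    (fun acc (p : Int × Char) =>
      if p.2 = '#' then acc ++ PySem.Int.toChars (p.1 + 1)
      else acc ++ ((PySem.Str.pyGet? string p.1).map (fun c => [c])).getD [])
    [])

-- ===== PORT B =====
-- B: the regex engine repeatedly finds the next '#' and splices in the callback's value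
-- str(m.start() + 1); ported as a recursion that finds the next '#' with findIdx?.
def pvRegexSub (pos : Nat) (cs : List Char) : List Char :=
  match h : cs.findIdx? (· = '#') with
  | none => cs
  | some i =>
      cs.take i ++ PySem.Int.toChars ((pos + i + 1 : Nat) : Int)
        ++ pvRegexSub (pos + i + 1) (cs.drop (i + 1))
termination_by cs.length
decreasing_by
  have hi : i < cs.length := (List.findIdx?_eq_some_iff_getElem.mp h).fst
  simp [List.length_drop]; omega

def sharp_replacer_alt (string : String) : String :=
  String.mk (pvRegexSub 0 string.toList)

-- ===== PRECONDITION & SPEC =====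
def Spec_sharp_replacer (string : String) (out : String) : Prop := out = sharp_replacer_alt string
instance (string : String) (out : String) : Decidable (Spec_sharp_replacer string out) := by unfold Spec_sharp_replacer; infer_instance

-- ===== CLAIM (what is proved, stated in full; the proofs are below) =====
def Claim_equal_sharp_replacer : Prop := ∀ (string : String), Dom_sharp_replacer string → Spec_sharp_replacer string (sharp_replacer string)

-- ===== LEMMAS AND PROOFS =====

-- common characterisation: per-character map with running position
def pvG (pos : Nat) : List Char → List Char
  | [] => []
  | c :: t => (if c = '#' then PySem.Int.toChars ((pos + 1 : Nat) : Int) else [c]) ++ pvG (pos + 1) t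

theorem pvG_append (xs : List Char) : ∀ (pos : Nat) (ys : List Char),
    pvG pos (xs ++ ys) = pvG pos xs ++ pvG (pos + xs.length) ys := by
  induction xs with
  | nil => intro pos ys; simp [pvG]
  | cons c t ih =>
      intro pos ys
      simp [pvG, ih (pos + 1) ys, List.append_assoc]
      ring_nf

theorem pvG_no_sharp (xs : List Char) : ∀ (pos : Nat), (∀ c ∈ xs, ¬ c = '#') → pvG pos xs = xs := by
  induction xs with
  | nil => intro pos _; rfl
  | cons c t ih =>
      intro pos hx
      have hc : ¬ c = '#' := hx c (by simp)
      simp [pvG, hc, ih (pos + 1) (fun d hd => hx d (by simp [hd]))]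

theorem pvRegexSub_eq_pvG (n : Nat) : ∀ (cs : List Char), cs.length ≤ n → ∀ (pos : Nat),
    pvRegexSub pos cs = pvG pos cs := by
  induction n with
  | zero =>
      intro cs hcs pos
      have : cs = [] := List.eq_nil_of_length_eq_zero (by omega)
      subst this; simp [pvRegexSub, pvG]
  | succ n ih =>
      intro cs hcs pos
      rw [pvRegexSub]
      cases h : cs.findIdx? (· = '#') with
      | none =>
          have hno : ∀ c ∈ cs, ¬ c = '#' := by
            intro c hc
            have := List.findIdx?_eq_none_iff.mp h c hc
            simpa using this
          exact (pvG_no_sharp cs pos hno).symm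
      | some i =>
          obtain ⟨hi, hget, hbefore⟩ := List.findIdx?_eq_some_iff_getElem.mp h
          have hsharp : cs[i] = '#' := by simpa using hget
          have hcs' : cs = cs.take i ++ cs[i] :: cs.drop (i + 1) := by
            simpa using (List.take_append_getElem_append_drop (i := i) (l := cs) hi).symm
          conv_rhs => rw [hcs']
          rw [pvG_append]
          have hlen : (cs.take i).length = i := by simp [List.length_take]; omega
          have hno : ∀ c ∈ cs.take i, ¬ c = '#' := by
            intro c hc
            obtain ⟨j, hj, rfl⟩ := List.getElem_of_mem hc
            have hj' : j < i := by simpa [hlen] using hj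
            have := hbefore j hj'
            simpa [List.getElem_take] using this
          rw [pvG_no_sharp _ _ hno, hlen]
          simp only [pvG, hsharp, if_pos rfl]
          have hdlen : (cs.drop (i + 1)).length ≤ n := by
            simp [List.length_drop]; omega
          rw [ih (cs.drop (i + 1)) hdlen (pos + i + 1)]
          simp [List.append_assoc]

theorem foldA_eq_pvG (str : String) (l2 : List Char) : ∀ (s : Nat) (acc : List Char),
    (∀ k, k < l2.length → str.toList[s + k]? = l2[k]?) →
    (PySem.List.enumerate l2 (s : Int)).foldl
      (fun acc (p : Int × Char) =>
        if p.2 = '#' then acc ++ PySem.Int.toChars (p.1 + 1)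
        else acc ++ ((PySem.Str.pyGet? str p.1).map (fun c => [c])).getD []) acc
      = acc ++ pvG s l2 := by
  induction l2 with
  | nil => intro s acc _; simp [PySem.List.enumerate_nil, pvG]
  | cons c t ih =>
      intro s acc hk
      have hc : str.toList[s]? = some c := by simpa using hk 0 (by simp)
      have hcast : (s : Int) + 1 = ((s + 1 : Nat) : Int) := by push_cast; ring
      have hk' : ∀ k, k < t.length → str.toList[(s + 1) + k]? = t[k]? := by
        intro k hkk
        have := hk (k + 1) (by simpa using Nat.succ_lt_succ hkk)
        simpa [Nat.add_assoc, Nat.add_comm 1 k] using this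
      rw [PySem.List.enumerate_cons, List.foldl_cons]
      simp only [show ((s : Int), c).2 = c from rfl, show ((s : Int), c).1 = (s : Int) from rfl,
        hcast]
      by_cases hsh : c = '#'
      · rw [if_pos hsh, ih (s + 1) _ hk']
        simp [pvG, hsh, List.append_assoc]
      · rw [if_neg hsh]
        have hone : ((PySem.Str.pyGet? str ((s : Nat) : Int)).map (fun c => [c])).getD [] = [c] := by
          simp [hc]
        rw [hone, ih (s + 1) _ hk']
        simp [pvG, hsh, List.append_assoc]

-- ===== VERDICT (by name: the statement is the Claim_ definition above) =====
theorem sharp_replacer_spec : Claim_equal_sharp_replacer := by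
  intro string _
  unfold Spec_sharp_replacer sharp_replacer sharp_replacer_alt
  have h1 := foldA_eq_pvG string string.toList 0 []
    (by intro k _; simp)
  have h2 := pvRegexSub_eq_pvG string.toList.length string.toList (le_refl _) 0
  simp only [Int.natCast_zero] at h1
  rw [h1, h2]
  rfl
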